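-- pv_equiv track=rewrite | github.com/buddy-compiler/buddy-mlir | tests/Python/AtenOpsCoverage/test_aten_op_batch_009.py | _num_tril_indices
-- ===== SOURCE A (Python) =====
-- def _num_tril_indices(row: int, col: int, offset: int) -> int:
--     n = 0
--     for i in range(row):
--         upper = i + offset + 1
--         if upper <= 0:
--             continue
--         n += min(col, upper)
--     return n
-- ===== SOURCE B (Python) =====
-- def _num_tril_indices(row: int, col: int, offset: int) -> int:
--     # Closed-form: sum min(col, i+offset+1) over i in [lo, row) splits at k = col-offset-1
--     lo = max(0, -offset)
--     if row <= lo: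
--         return 0
--     b = min(row - 1, col - offset - 1)
--     s = 0
--     if lo <= b:
--         s = (b - lo + 1) * (lo + b + 2 * offset + 2) // 2
--     c = max(lo, col - offset)
--     if c < row:
--         s += (row - c) * col
--     return s
-- ===== Notes on version B (the rewrite author's own statement) =====
-- stated objective: faster
-- what changed: Replaced the O(row) loop summing min(col, i+offset+1) with a closed-form arithmetic-series formula split into the ramp region and the col-saturated region.
import Mathlib
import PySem

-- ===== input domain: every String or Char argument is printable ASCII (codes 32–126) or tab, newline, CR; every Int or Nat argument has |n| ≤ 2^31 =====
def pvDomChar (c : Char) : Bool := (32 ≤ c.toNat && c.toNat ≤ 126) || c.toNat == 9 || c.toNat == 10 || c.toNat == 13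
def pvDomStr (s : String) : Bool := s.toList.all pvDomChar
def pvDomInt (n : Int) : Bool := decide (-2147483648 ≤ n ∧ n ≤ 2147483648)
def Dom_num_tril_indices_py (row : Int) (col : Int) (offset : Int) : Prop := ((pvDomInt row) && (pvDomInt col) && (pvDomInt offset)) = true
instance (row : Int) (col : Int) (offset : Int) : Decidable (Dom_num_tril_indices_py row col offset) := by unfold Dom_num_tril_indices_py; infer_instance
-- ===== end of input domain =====

-- B replaces A's O(row) summation loop by a closed-form split into ramp and saturated regions (objective: faster).

-- ===== PORT A =====
def num_tril_indices_py (row : Int) (col : Int) (offset : Int) : Int :=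
  (PySem.List.pyRange 0 row 1).foldl
    (fun n i =>
      let upper := i + offset + 1
      if upper ≤ 0 then n else n + min col upper) 0

-- ===== PORT B =====
def num_tril_indices_py_alt (row : Int) (col : Int) (offset : Int) : Int :=
  let lo := max 0 (-offset)
  if row ≤ lo then 0
  else
    let b := min (row - 1) (col - offset - 1)
    let s := if lo ≤ b then PySem.Int.floordiv ((b - lo + 1) * (lo + b + 2 * offset + 2)) 2 else 0
    let c := max lo (col - offset)
    if c < row then s + (row - c) * col else s

-- ===== PRECONDITION & SPEC =====
def Spec_num_tril_indices_py (row : Int) (col : Int) (offset : Int) (out : Int) : Prop := out = num_tril_indices_py_alt row col offset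
instance (row : Int) (col : Int) (offset : Int) (out : Int) : Decidable (Spec_num_tril_indices_py row col offset out) := by unfold Spec_num_tril_indices_py; infer_instance

-- ===== CLAIM (what is proved, stated in full; the proofs are below) =====
def Claim_equal_num_tril_indices_py : Prop := ∀ (row : Int) (col : Int) (offset : Int), Dom_num_tril_indices_py row col offset → Spec_num_tril_indices_py row col offset (num_tril_indices_py row col offset)

-- ===== LEMMAS AND PROOFS =====

-- floor-division by 2 shifts across an added even term
theorem pv_fd_shift (x d : Int) : PySem.Int.floordiv (x + 2 * d) 2 = PySem.Int.floordiv x 2 + d := by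
  rw [PySem.Int.floordiv_eq_ediv_of_pos (by norm_num), PySem.Int.floordiv_eq_ediv_of_pos (by norm_num)]
  omega

theorem pv_fd_even (d : Int) : PySem.Int.floordiv (2 * d) 2 = d := by
  have h := pv_fd_shift 0 d
  simpa [PySem.Int.floordiv] using h

-- the per-iteration increment of A's loop
def pv_t (col offset i : Int) : Int := if i + offset + 1 ≤ 0 then 0 else min col (i + offset + 1)

theorem pv_A_succ (col offset : Int) (r : Nat) :
    num_tril_indices_py ((r : Int) + 1) col offset = num_tril_indices_py (r : Int) col offset + pv_t col offset r := by
  unfold num_tril_indices_py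
  rw [PySem.List.pyRange_one_succ_right (by positivity)]
  rw [List.foldl_append]
  simp only [List.foldl]
  unfold pv_t
  split_ifs <;> ring

theorem pv_B_step (col offset r : Int) (hr : 0 ≤ r) :
    num_tril_indices_py_alt (r + 1) col offset = num_tril_indices_py_alt r col offset + pv_t col offset r := by
  unfold num_tril_indices_py_alt pv_t
  set lo := max 0 (-offset) with hlo
  have hlo0 : 0 ≤ lo := le_max_left _ _
  by_cases h1 : r + 1 ≤ lo
  · -- both rows give 0, and the term is 0 (upper ≤ 0)
    have h2 : r ≤ lo := by omega
    have hup : r + offset + 1 ≤ 0 := by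
      have : r < lo := by omega
      rcases max_cases 0 (-offset) with ⟨he, _⟩ | ⟨he, _⟩ <;> omega
    simp [h1, h2, hup]
  · -- row r+1 is counted; r ≥ lo ≥ -offset so upper > 0
    have hrlo : lo ≤ r := by omega
    have hup : ¬ (r + offset + 1 ≤ 0) := by
      have : -offset ≤ lo := le_max_right _ _
      omega
    simp only [h1, hup, if_false]
    by_cases hk : r ≤ col - offset - 1
    · -- ramp region: term = r+offset+1
      have hb1 : min (r + 1 - 1) (col - offset - 1) = r := by omega
      have hmin : min col (r + offset + 1) = r + offset + 1 := by omega
      have hc : max lo (col - offset) = col - offset := by omega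
      have hcr1 : ¬ (max lo (col - offset) < r + 1) := by omega
      by_cases h2 : r ≤ lo
      · -- previous row count is 0 (r = lo)
        have hrlo' : r = lo := by omega
        have hcr : ¬ (max lo (col - offset) < r) := by omega
        simp only [if_pos h2, if_neg hcr1, hb1, hmin]
        have hnum : (r - lo + 1) * (lo + r + 2 * offset + 2) = 2 * (r + offset + 1) := by
          rw [hrlo']; ring
        rw [if_pos (by omega : lo ≤ r), hnum, pv_fd_even]
        ring
      · rw [if_neg h2]
        have hb2 : min (r - 1) (col - offset - 1) = r - 1 := by omega
        have hcr : ¬ (max lo (col - offset) < r) := by omega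
        simp only [if_neg hcr1, if_neg hcr, hb1, hb2, hmin]
        rw [if_pos (by omega : lo ≤ r), if_pos (by omega : lo ≤ r - 1)]
        have hnum : (r - lo + 1) * (lo + r + 2 * offset + 2)
            = (r - 1 - lo + 1) * (lo + (r - 1) + 2 * offset + 2) + 2 * (r + offset + 1) := by ring
        rw [hnum, pv_fd_shift]
    · -- saturated region: term = col
      have hmin : min col (r + offset + 1) = col := by omega
      have hb1 : min (r + 1 - 1) (col - offset - 1) = col - offset - 1 := by omega
      have hc : max lo (col - offset) ≤ r := by omega
      have hcr1 : max lo (col - offset) < r + 1 := by omega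
      rw [if_pos hcr1, hmin, hb1]
      by_cases h2 : r ≤ lo
      · -- r = lo and col - offset ≤ lo, so triangular part empty on both sides
        have hrlo' : r = lo := by omega
        have hnb : ¬ (lo ≤ col - offset - 1) := by omega
        rw [if_pos h2, if_neg hnb]
        have hcmax : max lo (col - offset) = lo := by omega
        rw [hcmax, hrlo']
        ring
      · rw [if_neg h2]
        have hb2 : min (r - 1) (col - offset - 1) = col - offset - 1 := by omega
        rw [hb2]
        by_cases hcr : max lo (col - offset) < r
        · rw [if_pos hcr]; ring
        · have hceq : max lo (col - offset) = r := by omega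
          rw [if_neg hcr, hceq]; ring

theorem pv_eq_nat (col offset : Int) : ∀ r : Nat,
    num_tril_indices_py (r : Int) col offset = num_tril_indices_py_alt (r : Int) col offset := by
  intro r
  induction r with
  | zero =>
      unfold num_tril_indices_py num_tril_indices_py_alt
      rw [PySem.List.pyRange_one_eq_nil (by norm_num)]
      simp only [List.foldl]
      rw [if_pos (by exact le_max_left _ _)]
  | succ n ih =>
      have h1 : ((n + 1 : Nat) : Int) = (n : Int) + 1 := by push_cast; ring
      rw [h1, pv_A_succ, pv_B_step col offset (n : Int) (by positivity), ih]

-- ===== VERDICT (by name: the statement is the Claim_ definition above) =====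
theorem num_tril_indices_py_spec : Claim_equal_num_tril_indices_py := by
  intro row col offset _
  unfold Spec_num_tril_indices_py
  by_cases h : row ≤ 0
  · unfold num_tril_indices_py num_tril_indices_py_alt
    rw [PySem.List.pyRange_one_eq_nil h]
    simp only [List.foldl]
    rw [if_pos (by exact le_trans h (le_max_left _ _))]
  · have h0 : (row.toNat : Int) = row := Int.toNat_of_nonneg (by omega)
    have := pv_eq_nat col offset row.toNat
    rw [h0] at this
    exact this
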